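-- pv_equiv track=rewrite | github.com/lixiang2017/leetcode | leetcode-cn/lcp/LCP_41._黑白翻转棋.py | flipChess
-- ===== SOURCE A (Python) =====
-- from typing import List
--
-- def flipChess(chessboard: List[str]) -> int:
--     m, n = len(chessboard), len(chessboard[0])
--     dirs = [[-1, 1], [1, -1], [1, 1], [-1, -1], [1, 0], [0, 1], [-1, 0], [0, -1]]
--
--     def find(i, j, d, visited):
--         res = set()
--         while True:
--             i += dirs[d][0]
--             j += dirs[d][1]
--             if not (0 <= i < m and 0 <= j < n) or chessboard[i][j] == '.':
--                 return set()
--             if (i, j) not in visited and chessboard[i][j] == 'O':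
--                 res.add((i, j))
--             else:
--                 return res
--
--     def bfs(i, j):
--         q = {(i, j)}
--         visited = {(i, j)}
--         while q:
--             next_q = set()
--             for r, c in q:
--                 for d in range(8):
--                     new = find(r, c, d, visited)
--                     next_q |= new
--                     visited |= new
--             q = next_q
--         return len(visited) - 1
--
--     ans = 0
--     for i in range(m):
--         for j in range(n):
--             if chessboard[i][j] == '.':
--                 ans = max(ans, bfs(i, j))
--     return ans
-- ===== SOURCE B (Python) =====
-- from typing import List
--
-- def flipChess(chessboard: List[str]) -> int:
--     m, n = len(chessboard), len(chessboard[0])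
--     dirs = ((-1, 1), (1, -1), (1, 1), (-1, -1), (1, 0), (0, 1), (-1, 0), (0, -1))
--
--     def run_from(i, j, di, dj, flipped):
--         # maximal run of unflipped 'O' cells from (i, j); kept only when the
--         # run is terminated by a piece or an already-flipped cell
--         run = []
--         i += di
--         j += dj
--         while 0 <= i < m and 0 <= j < n and chessboard[i][j] == 'O' and (i, j) not in flipped:
--             run.append((i, j))
--             i += di
--             j += dj
--         if 0 <= i < m and 0 <= j < n and chessboard[i][j] != '.' and (chessboard[i][j] != 'O' or (i, j) in flipped):
--             return run
--         return []
--
--     best = 0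
--     for si in range(m):
--         for sj in range(n):
--             if chessboard[si][sj] != '.':
--                 continue
--             flipped = set()
--             # flips caused directly by the placed piece, against the original board
--             for di, dj in dirs:
--                 flipped |= set(run_from(si, sj, di, dj, flipped))
--             # saturate: rescan every flipped cell until a full pass adds nothing
--             changed = True
--             while changed:
--                 changed = False
--                 for (ci, cj) in list(flipped):
--                     for di, dj in dirs:
--                         run = run_from(ci, cj, di, dj, flipped)
--                         if run:
--                             flipped |= set(run)
--                             changed = True
--             best = max(best, len(flipped))
--     return best
-- ===== Notes on version B (the rewrite author's own statement) =====
-- stated objective: alternative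
-- what changed: Replaces A's frontier BFS (wave queue expanding each visited cell exactly once) by a different decomposition: the placed piece's flips are computed once up front, then a Gauss-Seidel fixpoint loop rescans every flipped cell along all 8 rays until a full pass adds nothing.
import Mathlib
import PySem

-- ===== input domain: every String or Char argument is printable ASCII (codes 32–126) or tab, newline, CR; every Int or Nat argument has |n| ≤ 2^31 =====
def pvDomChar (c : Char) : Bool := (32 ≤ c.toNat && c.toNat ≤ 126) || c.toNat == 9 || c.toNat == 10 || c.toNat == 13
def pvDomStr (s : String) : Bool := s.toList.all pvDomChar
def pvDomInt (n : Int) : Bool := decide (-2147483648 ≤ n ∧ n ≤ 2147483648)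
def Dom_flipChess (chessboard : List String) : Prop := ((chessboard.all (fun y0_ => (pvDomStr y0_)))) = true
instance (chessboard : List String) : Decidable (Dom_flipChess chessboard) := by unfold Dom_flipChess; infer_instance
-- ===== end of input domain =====

-- B re-implements the flood with a different decomposition (placement expansion once, then a
-- Gauss-Seidel rescan of all flipped cells until a quiescent pass) instead of A's frontier BFS;
-- equal return value is proved on Pre_ (inputs where A does not raise).

-- ===== PORT A =====
-- chessboard[i][j]; total form with a default, exact under Pre_ (both programs index only after a bounds check)
def pvAt (cb : List String) (i j : Int) : Char :=
  PySem.List.pyGetD (PySem.List.pyGetD cb i "").toList j '?'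

def pvDirsA : List (Int × Int) := [(-1, 1), (1, -1), (1, 1), (-1, -1), (1, 0), (0, 1), (-1, 0), (0, -1)]

-- A's `find`: while-True walk; fuel (m+n).toNat+2 only makes it total (the walk leaves the board
-- after at most max(m,n)+1 steps, proved below)
def pvFindA (cb : List String) (m n di dj : Int) (visited : List (Int × Int)) :
    Nat → Int → Int → List (Int × Int) → List (Int × Int)
  | 0, _, _, res => res
  | fuel+1, i, j, res =>
    let i' := i + di
    let j' := j + dj
    if ¬(0 ≤ i' ∧ i' < m ∧ 0 ≤ j' ∧ j' < n) ∨ pvAt cb i' j' = '.' then []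
    else if (i', j') ∉ visited ∧ pvAt cb i' j' = 'O' then
      pvFindA cb m n di dj visited fuel i' j' (PySem.Set.add res (i', j'))
    else res

-- one iteration of A's `while q` body: next_q and visited accumulated over q × range(8)
def pvWave (cb : List String) (m n : Int) (q visited : List (Int × Int)) :
    List (Int × Int) × List (Int × Int) :=
  q.foldl (fun st rc =>
    (PySem.List.pyRange 0 8 1).foldl (fun st d =>
      let dir := PySem.List.pyGetD pvDirsA d (0, 0)
      let nw := pvFindA cb m n dir.1 dir.2 st.2 ((m + n).toNat + 2) rc.1 rc.2 []
      (PySem.Set.union st.1 nw, PySem.Set.union st.2 nw)) st) ([], visited)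

-- A's `while q` loop; fuel (m*n).toNat+2 only makes it total (each continuing wave grows visited)
def pvBfsLoop (cb : List String) (m n : Int) : Nat → List (Int × Int) → List (Int × Int) → List (Int × Int)
  | 0, _, visited => visited
  | fuel+1, q, visited =>
    if q = [] then visited
    else
      let st := pvWave cb m n q visited
      pvBfsLoop cb m n fuel st.1 st.2

def pvBfsA (cb : List String) (m n i j : Int) : Int :=
  PySem.List.len (pvBfsLoop cb m n ((m * n).toNat + 2) [(i, j)] [(i, j)]) - 1

def flipChess (chessboard : List String) : Int :=
  let m : Int := PySem.List.len chessboard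
  let n : Int := PySem.List.len (PySem.List.pyGetD chessboard 0 "").toList
  (PySem.List.pyRange 0 m 1).foldl (fun ans i =>
    (PySem.List.pyRange 0 n 1).foldl (fun ans j =>
      if pvAt chessboard i j = '.' then max ans (pvBfsA chessboard m n i j) else ans) ans) 0

-- ===== PORT B =====
def pvDirsB : List (Int × Int) := [(-1, 1), (1, -1), (1, 1), (-1, -1), (1, 0), (0, 1), (-1, 0), (0, -1)]

-- the while-loop of B's `run_from`; fuel only makes it total
def pvWalkB (cb : List String) (m n di dj : Int) (flipped : List (Int × Int)) :
    Nat → Int → Int → List (Int × Int) → List (Int × Int) × Int × Int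
  | 0, i, j, run => (run, i, j)
  | fuel+1, i, j, run =>
    if 0 ≤ i ∧ i < m ∧ 0 ≤ j ∧ j < n ∧ pvAt cb i j = 'O' ∧ (i, j) ∉ flipped then
      pvWalkB cb m n di dj flipped fuel (i + di) (j + dj) (run ++ [(i, j)])
    else (run, i, j)

def pvRunFrom (cb : List String) (m n i j di dj : Int) (flipped : List (Int × Int)) : List (Int × Int) :=
  let w := pvWalkB cb m n di dj flipped ((m + n).toNat + 2) (i + di) (j + dj) []
  if 0 ≤ w.2.1 ∧ w.2.1 < m ∧ 0 ≤ w.2.2 ∧ w.2.2 < n ∧ pvAt cb w.2.1 w.2.2 ≠ '.' ∧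
      (pvAt cb w.2.1 w.2.2 ≠ 'O' ∨ (w.2.1, w.2.2) ∈ flipped) then
    w.1
  else []

-- flips caused directly by the placed piece
def pvSeedB (cb : List String) (m n i j : Int) : List (Int × Int) :=
  pvDirsB.foldl (fun flipped dir =>
    PySem.Set.union flipped (pvRunFrom cb m n i j dir.1 dir.2 flipped)) []

-- one full pass over the snapshot `list(flipped)`, with the `changed` flag
def pvPassB (cb : List String) (m n : Int) (cells flipped : List (Int × Int)) :
    List (Int × Int) × Bool :=
  cells.foldl (fun st c =>
    pvDirsB.foldl (fun st dir =>
      let run := pvRunFrom cb m n c.1 c.2 dir.1 dir.2 st.1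
      if run ≠ [] then (PySem.Set.union st.1 run, true) else st) st) (flipped, false)

-- B's `while changed` loop (entered once unconditionally); fuel only makes it total
def pvSatLoop (cb : List String) (m n : Int) : Nat → List (Int × Int) → List (Int × Int)
  | 0, flipped => flipped
  | fuel+1, flipped =>
    let st := pvPassB cb m n flipped flipped
    if st.2 then pvSatLoop cb m n fuel st.1 else st.1

def flipChess_alt (chessboard : List String) : Int :=
  let m : Int := PySem.List.len chessboard
  let n : Int := PySem.List.len (PySem.List.pyGetD chessboard 0 "").toList
  (PySem.List.pyRange 0 m 1).foldl (fun best si =>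
    (PySem.List.pyRange 0 n 1).foldl (fun best sj =>
      if pvAt chessboard si sj ≠ '.' then best
      else
        max best (PySem.List.len
          (pvSatLoop chessboard m n ((m * n).toNat + 2) (pvSeedB chessboard m n si sj)))) best) 0

-- ===== PRECONDITION & SPEC =====
-- Pre_ excludes exactly the inputs where Python A raises IndexError: the empty board
-- (chessboard[0]) and boards with a row shorter than the first row (chessboard[i][j], j < n).
def Pre_flipChess (chessboard : List String) : Prop :=
  chessboard ≠ [] ∧ ∀ s ∈ chessboard,
    ((chessboard.headD "").toList.length : Int) ≤ (s.toList.length : Int)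
instance (chessboard : List String) : Decidable (Pre_flipChess chessboard) := by
  unfold Pre_flipChess; infer_instance

def pvWitness_flipChess : List String := [".OX", "OO.", "X.."]

def Spec_flipChess (chessboard : List String) (out : Int) : Prop := out = flipChess_alt chessboard
instance (chessboard : List String) (out : Int) : Decidable (Spec_flipChess chessboard out) := by
  unfold Spec_flipChess; infer_instance

-- ===== CLAIM (what is proved, stated in full; the proofs are below) =====
def Claim_equal_flipChess : Prop := ∀ (chessboard : List String), Dom_flipChess chessboard → Pre_flipChess chessboard → Spec_flipChess chessboard (flipChess chessboard)

-- ===== LEMMAS AND PROOFS =====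

-- ===================== SPEC LAYER =====================

def pvFULL (m n : Int) : Nat := (m + n).toNat + 2

def pvW (cb : List String) (m n di dj : Int) (F : List (Int × Int)) (p : Int × Int) :
    List (Int × Int) × Int × Int :=
  pvWalkB cb m n di dj F (pvFULL m n) p.1 p.2 []

@[reducible] def pvInB (m n : Int) (p : Int × Int) : Prop := 0 ≤ p.1 ∧ p.1 < m ∧ 0 ≤ p.2 ∧ p.2 < n

@[reducible] def pvCondW (cb : List String) (m n : Int) (F : List (Int × Int)) (p : Int × Int) : Prop :=
  0 ≤ p.1 ∧ p.1 < m ∧ 0 ≤ p.2 ∧ p.2 < n ∧ pvAt cb p.1 p.2 = 'O' ∧ (p.1, p.2) ∉ F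

@[reducible] def pvPost (cb : List String) (m n : Int) (F : List (Int × Int)) (p : Int × Int) : Prop :=
  0 ≤ p.1 ∧ p.1 < m ∧ 0 ≤ p.2 ∧ p.2 < n ∧ pvAt cb p.1 p.2 ≠ '.' ∧
    (pvAt cb p.1 p.2 ≠ 'O' ∨ (p.1, p.2) ∈ F)

@[reducible] def pvDOK (di dj : Int) : Prop :=
  (di = -1 ∨ di = 0 ∨ di = 1) ∧ (dj = -1 ∨ dj = 0 ∨ dj = 1) ∧ ¬(di = 0 ∧ dj = 0)

def pvNu (m n di dj i j : Int) : Nat :=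
  ((if 0 < di then m - i else if di < 0 then i + 1 else 0) +
   (if 0 < dj then n - j else if dj < 0 then j + 1 else 0)).toNat

def pvKey (di dj : Int) (p : Int × Int) : Int := di * p.1 + dj * p.2

def pvGood (cb : List String) (m n : Int) (F : List (Int × Int)) : Prop :=
  ∀ x ∈ F, pvInB m n x ∧ pvAt cb x.1 x.2 = 'O'

def pvClosed (cb : List String) (m n : Int) (F : List (Int × Int)) : Prop :=
  ∀ v ∈ F, ∀ dir ∈ pvDirsB, pvRunFrom cb m n v.1 v.2 dir.1 dir.2 F = []

def pvINVb (cb : List String) (m n : Int) (q F : List (Int × Int)) : Prop :=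
  ∀ v ∈ F, v ∉ q → ∀ dir ∈ pvDirsB,
    pvRunFrom cb m n v.1 v.2 dir.1 dir.2 F = [] ∨
      (pvW cb m n dir.1 dir.2 F (v.1 + dir.1, v.2 + dir.2)).2 ∈ q

-- basic facts about the direction set
lemma pvDirs_dok : ∀ d ∈ pvDirsB, pvDOK d.1 d.2 := by decide

lemma pvDirs_neg : ∀ d ∈ pvDirsB, ((-d.1, -d.2) : Int × Int) ∈ pvDirsB := by decide

lemma pvDirsA_eq : pvDirsA = pvDirsB := rfl

lemma pvDOK_neg {di dj : Int} (h : pvDOK di dj) : pvDOK (-di) (-dj) := by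
  obtain ⟨h1, h2, h3⟩ := h
  refine ⟨?_, ?_, ?_⟩ <;> omega

-- run-from as a conditional on pvW
lemma runFrom_of_post {cb : List String} {m n i j di dj : Int} {F : List (Int × Int)}
    (h : pvPost cb m n F (pvW cb m n di dj F (i + di, j + dj)).2) :
    pvRunFrom cb m n i j di dj F = (pvW cb m n di dj F (i + di, j + dj)).1 := by
  unfold pvPost pvW pvFULL at h
  unfold pvRunFrom
  dsimp only
  rw [if_pos h]
  rfl

lemma runFrom_of_not_post {cb : List String} {m n i j di dj : Int} {F : List (Int × Int)}
    (h : ¬ pvPost cb m n F (pvW cb m n di dj F (i + di, j + dj)).2) :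
    pvRunFrom cb m n i j di dj F = [] := by
  unfold pvPost pvW pvFULL at h
  unfold pvRunFrom
  dsimp only
  rw [if_neg h]

-- accumulator lemma for the walk
lemma walkB_acc (cb : List String) (m n di dj : Int) (F : List (Int × Int)) :
    ∀ (fuel : Nat) (i j : Int) (run : List (Int × Int)),
      pvWalkB cb m n di dj F fuel i j run =
        (run ++ (pvWalkB cb m n di dj F fuel i j []).1,
         (pvWalkB cb m n di dj F fuel i j []).2) := by
  intro fuel
  induction fuel with
  | zero => intro i j run; simp [pvWalkB]
  | succ f ih =>
    intro i j run
    simp only [pvWalkB]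
    split_ifs with hC
    · rw [ih (i + di) (j + dj) (run ++ [(i, j)]), ih (i + di) (j + dj) ([] ++ [(i, j)])]
      simp
    · simp

-- fuel stability
lemma walkB_stable (cb : List String) (m n di dj : Int) (F : List (Int × Int))
    (hd : pvDOK di dj) :
    ∀ (fuel : Nat) (i j : Int) (run : List (Int × Int)), pvNu m n di dj i j ≤ fuel →
      pvWalkB cb m n di dj F (fuel + 1) i j run = pvWalkB cb m n di dj F fuel i j run := by
  obtain ⟨h1, h2, h3⟩ := hd
  intro fuel
  induction fuel with
  | zero =>
    intro i j run hν
    simp only [pvWalkB]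
    rw [if_neg]
    intro hC
    obtain ⟨c1, c2, c3, c4, -, -⟩ := hC
    unfold pvNu at hν
    split_ifs at hν <;> omega
  | succ f ih =>
    intro i j run hν
    conv_lhs => rw [pvWalkB]
    conv_rhs => rw [pvWalkB]
    split_ifs with hC
    · obtain ⟨c1, c2, c3, c4, -, -⟩ := hC
      refine ih (i + di) (j + dj) (run ++ [(i, j)]) ?_
      unfold pvNu at hν ⊢
      split_ifs at hν ⊢ <;> omega
    · rfl

lemma walkB_eq_of_le (cb : List String) (m n di dj : Int) (F : List (Int × Int))
    (hd : pvDOK di dj) {f1 f2 : Nat} {i j : Int} {run : List (Int × Int)}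
    (h1 : pvNu m n di dj i j ≤ f1) (h12 : f1 ≤ f2) :
    pvWalkB cb m n di dj F f2 i j run = pvWalkB cb m n di dj F f1 i j run := by
  obtain ⟨k, rfl⟩ := Nat.exists_eq_add_of_le h12
  induction k with
  | zero => rfl
  | succ t ih =>
    have : f1 + (t + 1) = (f1 + t) + 1 := by omega
    rw [this, walkB_stable cb m n di dj F hd (f1 + t) i j run (le_trans h1 (by omega)), ih (by omega)]

-- arithmetic facts about the step bound
lemma nu_step_lt {m n di dj : Int} (hd : pvDOK di dj) {p : Int × Int} (hin : pvInB m n p) :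
    pvNu m n di dj (p.1 + di) (p.2 + dj) + 1 ≤ pvNu m n di dj p.1 p.2 := by
  obtain ⟨h1, h2, h3⟩ := hd
  obtain ⟨c1, c2, c3, c4⟩ := hin
  unfold pvNu
  split_ifs <;> omega

lemma nu_le_full {m n di dj : Int} (hd : pvDOK di dj) {p : Int × Int} (hin : pvInB m n p) :
    pvNu m n di dj p.1 p.2 ≤ pvFULL m n := by
  obtain ⟨h1, h2, h3⟩ := hd
  obtain ⟨c1, c2, c3, c4⟩ := hin
  unfold pvNu pvFULL
  split_ifs <;> omega

-- one-step unfoldings of pvW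
lemma pvW_stop {cb : List String} {m n di dj : Int} {F : List (Int × Int)} {p : Int × Int}
    (hC : ¬ pvCondW cb m n F p) : pvW cb m n di dj F p = ([], p.1, p.2) := by
  unfold pvCondW at hC
  unfold pvW pvFULL
  rw [pvWalkB]
  rw [if_neg hC]

lemma pvW_step {cb : List String} {m n di dj : Int} {F : List (Int × Int)} {p : Int × Int}
    (hd : pvDOK di dj) (hν : pvNu m n di dj p.1 p.2 ≤ pvFULL m n)
    (hC : pvCondW cb m n F p) :
    pvW cb m n di dj F p =
      ((p.1, p.2) :: (pvW cb m n di dj F (p.1 + di, p.2 + dj)).1,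
       (pvW cb m n di dj F (p.1 + di, p.2 + dj)).2) := by
  unfold pvCondW at hC
  unfold pvFULL at hν
  unfold pvW pvFULL
  dsimp only
  conv_lhs => rw [pvWalkB]
  rw [if_pos hC]
  rw [walkB_acc cb m n di dj F ((m + n).toNat + 1) (p.1 + di) (p.2 + dj) ([] ++ [(p.1, p.2)])]
  have hnext : pvNu m n di dj (p.1 + di) (p.2 + dj) ≤ (m + n).toNat + 1 := by
    have := nu_step_lt (m := m) (n := n) hd (p := p) ⟨hC.1, hC.2.1, hC.2.2.1, hC.2.2.2.1⟩
    omega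
  rw [walkB_eq_of_le cb m n di dj F hd (f2 := (m + n).toNat + 2) hnext (by omega)]
  simp

lemma pvW_nil_eq {cb : List String} {m n di dj : Int} {F : List (Int × Int)} {p : Int × Int}
    (h : (pvW cb m n di dj F p).1 = []) : (pvW cb m n di dj F p).2 = (p.1, p.2) := by
  unfold pvW pvFULL at h ⊢
  rw [pvWalkB] at h ⊢
  split_ifs at h ⊢ with hC
  · rw [walkB_acc] at h
    simp at h
  · rfl

-- every collected cell satisfies the walking condition
lemma walkB_run_mem (cb : List String) (m n di dj : Int) (F : List (Int × Int)) :
    ∀ (fuel : Nat) (i j : Int) (x : Int × Int),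
      x ∈ (pvWalkB cb m n di dj F fuel i j []).1 → pvCondW cb m n F x := by
  intro fuel
  induction fuel with
  | zero => intro i j x hx; simp [pvWalkB] at hx
  | succ f ih =>
    intro i j x hx
    rw [pvWalkB] at hx
    split_ifs at hx with hC
    · rw [walkB_acc] at hx
      simp only [List.nil_append, List.cons_append, List.mem_cons] at hx
      rcases hx with rfl | hx
      · exact hC
      · exact ih _ _ _ hx
    · simp at hx

lemma pvW_run_mem {cb : List String} {m n di dj : Int} {F : List (Int × Int)} {p : Int × Int}
    {x : Int × Int} (hx : x ∈ (pvW cb m n di dj F p).1) : pvCondW cb m n F x := by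
  exact walkB_run_mem cb m n di dj F _ p.1 p.2 x hx

-- keys strictly increase along the run
lemma walkB_key (cb : List String) (m n di dj : Int) (F : List (Int × Int)) (hd : pvDOK di dj) :
    ∀ (fuel : Nat) (i j : Int),
      (∀ x ∈ (pvWalkB cb m n di dj F fuel i j []).1, pvKey di dj (i, j) ≤ pvKey di dj x) ∧
      (pvWalkB cb m n di dj F fuel i j []).1.Pairwise (fun a b => pvKey di dj a < pvKey di dj b) := by
  have hdd : 1 ≤ di * di + dj * dj := by
    obtain ⟨h1, h2, h3⟩ := hd
    rcases h1 with rfl | rfl | rfl <;> rcases h2 with rfl | rfl | rfl <;> omega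
  intro fuel
  induction fuel with
  | zero =>
    intro i j
    refine ⟨?_, ?_⟩ <;> simp [pvWalkB]
  | succ f ih =>
    intro i j
    rw [pvWalkB]
    split_ifs with hC
    · rw [walkB_acc]
      obtain ⟨ih1, ih2⟩ := ih (i + di) (j + dj)
      have hkstep : pvKey di dj (i, j) < pvKey di dj (i + di, j + dj) := by
        unfold pvKey
        have : di * (i + di) + dj * (j + dj) = di * i + dj * j + (di * di + dj * dj) := by ring
        simp only
        omega
      refine ⟨?_, ?_⟩
      · intro x hx
        simp only [List.nil_append, List.cons_append, List.mem_cons] at hx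
        rcases hx with rfl | hx
        · exact le_refl _
        · exact le_trans (le_of_lt hkstep) (ih1 x hx)
      · simp only [List.nil_append, List.cons_append]
        refine List.Pairwise.cons ?_ ih2
        intro x hx
        exact lt_of_lt_of_le hkstep (ih1 x hx)
    · refine ⟨?_, ?_⟩ <;> simp

lemma pvW_nodup {cb : List String} {m n di dj : Int} {F : List (Int × Int)} {p : Int × Int}
    (hd : pvDOK di dj) : (pvW cb m n di dj F p).1.Nodup := by
  have := (walkB_key cb m n di dj F hd (pvFULL m n) p.1 p.2).2
  exact this.imp (fun h => by rintro rfl; exact lt_irrefl _ h)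

-- the stop cell fails the walking condition (given enough fuel)
lemma walkB_stop_not_cond (cb : List String) (m n di dj : Int) (F : List (Int × Int))
    (hd : pvDOK di dj) :
    ∀ (fuel : Nat) (i j : Int), pvNu m n di dj i j ≤ fuel →
      ¬ pvCondW cb m n F (pvWalkB cb m n di dj F fuel i j []).2 := by
  obtain ⟨h1, h2, h3⟩ := hd
  intro fuel
  induction fuel with
  | zero =>
    intro i j hν hC
    obtain ⟨c1, c2, c3, c4, -, -⟩ := hC
    simp only [pvWalkB] at c1 c2 c3 c4
    unfold pvNu at hν
    split_ifs at hν <;> omega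
  | succ f ih =>
    intro i j hν
    rw [pvWalkB]
    split_ifs with hC
    · rw [walkB_acc]
      simp only
      refine ih (i + di) (j + dj) ?_

      obtain ⟨c1, c2, c3, c4, -, -⟩ := hC
      unfold pvNu at hν ⊢
      split_ifs at hν ⊢ <;> omega
    · exact hC

lemma pvW_not_cond {cb : List String} {m n di dj : Int} {F : List (Int × Int)} {p : Int × Int}
    (hd : pvDOK di dj) (hν : pvNu m n di dj p.1 p.2 ≤ pvFULL m n) :
    ¬ pvCondW cb m n F (pvW cb m n di dj F p).2 := by
  exact walkB_stop_not_cond cb m n di dj F hd _ p.1 p.2 hν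

-- the walk w.r.t. a smaller blocker set factors through the stop of the larger one
lemma pvW_factor {cb : List String} {m n di dj : Int} {F G : List (Int × Int)}
    (hd : pvDOK di dj) (hFG : ∀ x, x ∈ F → x ∈ G) :
    ∀ (r : List (Int × Int)) (p : Int × Int), pvNu m n di dj p.1 p.2 ≤ pvFULL m n →
      (pvW cb m n di dj G p).1 = r →
      pvW cb m n di dj F p =
        (r ++ (pvW cb m n di dj F (pvW cb m n di dj G p).2).1,
         (pvW cb m n di dj F (pvW cb m n di dj G p).2).2) := by
  intro r
  induction r with
  | nil =>
    intro p hν hr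
    rw [pvW_nil_eq hr]
    simp
  | cons x r' ih =>
    intro p hν hr
    by_cases hC : pvCondW cb m n G p
    · have hstep := pvW_step (cb := cb) (F := G) hd hν hC
      rw [hstep] at hr
      obtain ⟨rfl, hr'⟩ : x = (p.1, p.2) ∧ (pvW cb m n di dj G (p.1 + di, p.2 + dj)).1 = r' := by
        exact ⟨(List.cons.injEq _ _ _ _ ▸ hr).1.symm, (List.cons.injEq _ _ _ _ ▸ hr).2⟩
      have hin : pvInB m n p := ⟨hC.1, hC.2.1, hC.2.2.1, hC.2.2.2.1⟩
      have hCF : pvCondW cb m n F p :=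
        ⟨hC.1, hC.2.1, hC.2.2.1, hC.2.2.2.1, hC.2.2.2.2.1, fun hmem => hC.2.2.2.2.2 (hFG _ hmem)⟩
      have hν' : pvNu m n di dj (p.1 + di) (p.2 + dj) ≤ pvFULL m n := by
        have := nu_step_lt (m := m) (n := n) hd hin
        omega
      have := ih (p.1 + di, p.2 + dj) hν' hr'
      rw [pvW_step (cb := cb) (F := F) hd hν hCF, hstep]
      simp only at this ⊢
      rw [this]
      simp
    · rw [pvW_stop hC] at hr
      simp at hr

-- walking back over a finished forward run
lemma pvW_reverse {cb : List String} {m n di dj : Int} {F G : List (Int × Int)}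
    (hd : pvDOK di dj) :
    ∀ (r : List (Int × Int)) (p : Int × Int), pvNu m n di dj p.1 p.2 ≤ pvFULL m n →
      (pvW cb m n di dj F p).1 = r → (∀ x ∈ r, x ∉ G) →
      pvW cb m n (-di) (-dj) G
          ((pvW cb m n di dj F p).2.1 - di, (pvW cb m n di dj F p).2.2 - dj) =
        (r.reverse ++ (pvW cb m n (-di) (-dj) G (p.1 - di, p.2 - dj)).1,
         (pvW cb m n (-di) (-dj) G (p.1 - di, p.2 - dj)).2) := by
  intro r
  induction r with
  | nil =>
    intro p hν hr hG
    rw [pvW_nil_eq hr]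
    simp
  | cons x r' ih =>
    intro p hν hr hG
    by_cases hC : pvCondW cb m n F p
    · have hstep := pvW_step (cb := cb) (F := F) hd hν hC
      rw [hstep] at hr
      obtain ⟨rfl, hr'⟩ : x = (p.1, p.2) ∧ (pvW cb m n di dj F (p.1 + di, p.2 + dj)).1 = r' := by
        exact ⟨(List.cons.injEq _ _ _ _ ▸ hr).1.symm, (List.cons.injEq _ _ _ _ ▸ hr).2⟩
      have hin : pvInB m n p := ⟨hC.1, hC.2.1, hC.2.2.1, hC.2.2.2.1⟩
      have hν' : pvNu m n di dj (p.1 + di) (p.2 + dj) ≤ pvFULL m n := by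
        have := nu_step_lt (m := m) (n := n) hd hin
        omega
      have hIH := ih (p.1 + di, p.2 + dj) hν' hr' (fun y hy => hG y (List.mem_cons_of_mem _ hy))
      simp only at hIH
      have e1 : p.1 + di - di = p.1 := by ring
      have e2 : p.2 + dj - dj = p.2 := by ring
      rw [e1, e2] at hIH
      -- evaluate the backward walk at p itself
      have hd' : pvDOK (-di) (-dj) := pvDOK_neg hd
      have hν'' : pvNu m n (-di) (-dj) p.1 p.2 ≤ pvFULL m n := nu_le_full hd' hin
      have hC' : pvCondW cb m n G (p.1, p.2) := by
        refine ⟨hC.1, hC.2.1, hC.2.2.1, hC.2.2.2.1, hC.2.2.2.2.1, ?_⟩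
        exact hG (p.1, p.2) (by simp)
      have hback := pvW_step (cb := cb) (F := G) (p := ((p.1 : Int), (p.2 : Int))) hd' hν'' hC'
      simp only at hback
      have e3 : p.1 + -di = p.1 - di := by ring
      have e4 : p.2 + -dj = p.2 - dj := by ring
      rw [e3, e4] at hback
      have hstop : (pvW cb m n di dj F p).2 = (pvW cb m n di dj F (p.1 + di, p.2 + dj)).2 := by
        rw [hstep]
      rw [hstop, hIH, hback]
      simp
    · rw [pvW_stop hC] at hr
      simp at hr

-- A's find equals B's run_from (same blockers apart from the placed '.'-cell)
lemma findA_eq {cb : List String} {m n di dj : Int} {visited F : List (Int × Int)}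
    {s : Int × Int} (hd : pvDOK di dj) (hs : pvAt cb s.1 s.2 = '.')
    (hvis : ∀ p : Int × Int, p ∈ visited ↔ p ∈ F ∨ p = s) :
    ∀ (fuel : Nat) (i j : Int) (res : List (Int × Int)),
      pvNu m n di dj (i + di) (j + dj) ≤ fuel →
      (∀ y ∈ res, pvKey di dj y < pvKey di dj (i + di, j + dj)) →
      pvFindA cb m n di dj visited (fuel + 1) i j res =
        (if pvPost cb m n F (pvWalkB cb m n di dj F fuel (i + di) (j + dj) res).2
         then (pvWalkB cb m n di dj F fuel (i + di) (j + dj) res).1 else []) := by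
  intro fuel
  induction fuel with
  | zero =>
    intro i j res hν hkey
    have hnin : ¬(0 ≤ i + di ∧ i + di < m ∧ 0 ≤ j + dj ∧ j + dj < n) := by
      obtain ⟨h1, h2, h3⟩ := hd
      intro hin
      obtain ⟨c1, c2, c3, c4⟩ := hin
      unfold pvNu at hν
      split_ifs at hν <;> omega
    rw [pvFindA]
    rw [if_pos (Or.inl hnin)]
    simp only [pvWalkB]
    rw [if_neg]
    intro hp
    exact hnin ⟨hp.1, hp.2.1, hp.2.2.1, hp.2.2.2.1⟩
  | succ f ih =>
    intro i j res hν hkey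
    rw [pvFindA]
    by_cases h1 : ¬(0 ≤ i + di ∧ i + di < m ∧ 0 ≤ j + dj ∧ j + dj < n) ∨ pvAt cb (i + di) (j + dj) = '.'
    · rw [if_pos h1, pvWalkB]
      have hCwalk : ¬(0 ≤ i + di ∧ i + di < m ∧ 0 ≤ j + dj ∧ j + dj < n ∧
          pvAt cb (i + di) (j + dj) = 'O' ∧ ((i + di, j + dj) : Int × Int) ∉ F) := by
        intro hC
        rcases h1 with h1 | h1
        · exact h1 ⟨hC.1, hC.2.1, hC.2.2.1, hC.2.2.2.1⟩
        · rw [h1] at hC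
          exact absurd hC.2.2.2.2.1 (by decide)
      rw [if_neg hCwalk]
      rw [if_neg]
      intro hp
      rcases h1 with h1 | h1
      · exact h1 ⟨hp.1, hp.2.1, hp.2.2.1, hp.2.2.2.1⟩
      · exact hp.2.2.2.2.1 h1
    · rw [if_neg h1]
      push_neg at h1
      obtain ⟨hin, hdot⟩ := h1
      by_cases h2 : ((i + di, j + dj) : Int × Int) ∉ visited ∧ pvAt cb (i + di) (j + dj) = 'O'
      · rw [if_pos h2]
        obtain ⟨hnv, hO⟩ := h2
        have hnF : ((i + di, j + dj) : Int × Int) ∉ F := by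
          intro hmem
          exact hnv ((hvis _).mpr (Or.inl hmem))
        have hadd : PySem.Set.add res ((i + di, j + dj)) = res ++ [(i + di, j + dj)] := by
          refine PySem.Set.add_of_not_mem ?_
          intro hmem
          exact absurd (hkey _ hmem) (lt_irrefl _)
        have hν' : pvNu m n di dj (i + di + di) (j + dj + dj) ≤ f := by
          have := nu_step_lt (m := m) (n := n) hd (p := (i + di, j + dj)) hin
          simp only at this
          omega
        have hkey' : ∀ y ∈ res ++ [(i + di, j + dj)],
            pvKey di dj y < pvKey di dj (i + di + di, j + dj + dj) := by
          have hdd : 1 ≤ di * di + dj * dj := by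
            obtain ⟨g1, g2, g3⟩ := hd
            rcases g1 with rfl | rfl | rfl <;> rcases g2 with rfl | rfl | rfl <;> omega
          have hstep : pvKey di dj (i + di, j + dj) < pvKey di dj (i + di + di, j + dj + dj) := by
            unfold pvKey
            have : di * (i + di + di) + dj * (j + dj + dj) =
                di * (i + di) + dj * (j + dj) + (di * di + dj * dj) := by ring
            simp only
            omega
          intro y hy
          rcases List.mem_append.mp hy with hy | hy
          · exact lt_trans (hkey y hy) hstep
          · simp at hy; subst hy; exact hstep
        rw [hadd, ih (i + di) (j + dj) (res ++ [(i + di, j + dj)]) hν' hkey']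
        conv_rhs => rw [pvWalkB]
        rw [if_pos (show 0 ≤ i + di ∧ i + di < m ∧ 0 ≤ j + dj ∧ j + dj < n ∧
            pvAt cb (i + di) (j + dj) = 'O' ∧ ((i + di, j + dj) : Int × Int) ∉ F from
            ⟨hin.1, hin.2.1, hin.2.2.1, hin.2.2.2, hO, hnF⟩)]
      · rw [if_neg h2]
        have hnotO : pvAt cb (i + di) (j + dj) = 'O' → ((i + di, j + dj) : Int × Int) ∈ F := by
          intro hO
          by_contra hnF
          refine h2 ⟨?_, hO⟩
          intro hv
          rcases (hvis _).mp hv with hmem | heq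
          · exact hnF hmem
          · subst heq
            simp only at hs
            rw [hs] at hO
            exact absurd hO (by decide)
        have hcond : ¬(0 ≤ i + di ∧ i + di < m ∧ 0 ≤ j + dj ∧ j + dj < n ∧
            pvAt cb (i + di) (j + dj) = 'O' ∧ ((i + di, j + dj) : Int × Int) ∉ F) := by
          intro hC
          exact hC.2.2.2.2.2 (hnotO hC.2.2.2.2.1)
        rw [pvWalkB, if_neg hcond, if_pos]
        refine ⟨hin.1, hin.2.1, hin.2.2.1, hin.2.2.2, hdot, ?_⟩
        by_cases hO : pvAt cb (i + di) (j + dj) = 'O'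
        · exact Or.inr (hnotO hO)
        · exact Or.inl hO

lemma findA_runFrom {cb : List String} {m n di dj : Int} {visited F : List (Int × Int)}
    {s : Int × Int} {i j : Int} (hd : pvDOK di dj) (hs : pvAt cb s.1 s.2 = '.')
    (hvis : ∀ p : Int × Int, p ∈ visited ↔ p ∈ F ∨ p = s) (hin : pvInB m n (i, j)) :
    pvFindA cb m n di dj visited ((m + n).toNat + 2) i j [] =
      pvRunFrom cb m n i j di dj F := by
  have hν : pvNu m n di dj (i + di) (j + dj) ≤ (m + n).toNat + 1 := by
    have h1 := nu_step_lt (m := m) (n := n) hd (p := ((i : Int), (j : Int))) hin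
    have h2 := nu_le_full (m := m) (n := n) hd (p := ((i : Int), (j : Int))) hin
    unfold pvFULL at h2
    simp only at h1 h2
    omega
  have heq : pvWalkB cb m n di dj F ((m + n).toNat + 2) (i + di) (j + dj) [] =
      pvWalkB cb m n di dj F ((m + n).toNat + 1) (i + di) (j + dj) [] :=
    walkB_eq_of_le cb m n di dj F hd hν (by omega)
  have h := findA_eq (m := m) (n := n) hd hs hvis ((m + n).toNat + 1) i j [] hν (by simp)
  rw [h]
  by_cases hp : pvPost cb m n F (pvW cb m n di dj F (i + di, j + dj)).2
  · rw [runFrom_of_post hp]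
    unfold pvW pvFULL at hp ⊢
    rw [heq] at hp ⊢
    rw [if_pos hp]
  · rw [runFrom_of_not_post hp]
    unfold pvW pvFULL at hp
    rw [heq] at hp
    rw [if_neg hp]

lemma set_union_append {s t : List (Int × Int)} (h1 : t.Nodup) (h2 : ∀ x ∈ t, x ∉ s) :
    PySem.Set.union s t = s ++ t := by
  exact PySem.Set.update_eq_append_of_disjoint _ _ h1 h2

-- any run from a cell of a closed set T, with blockers F ⊆ T, stays inside T
lemma absorb_aux {cb : List String} {m n di dj : Int} {F T : List (Int × Int)}
    (hd : pvDOK di dj) (hdm : ((di, dj) : Int × Int) ∈ pvDirsB)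
    (hT : pvClosed cb m n T) (hGT : pvGood cb m n T) (hFT : ∀ x ∈ F, x ∈ T) :
    ∀ (r : List (Int × Int)) (o : Int × Int), o ∈ T →
      (pvW cb m n di dj F (o.1 + di, o.2 + dj)).1 = r →
      pvPost cb m n F (pvW cb m n di dj F (o.1 + di, o.2 + dj)).2 →
      ∀ x ∈ r, x ∈ T := by
  intro r
  induction r with
  | nil => intro o _ _ _ x hx; simp at hx
  | cons x r' ih =>
    intro o ho hr hpost y hy
    have hinO : pvInB m n o := (hGT o ho).1
    have hν : pvNu m n di dj (o.1 + di) (o.2 + dj) ≤ pvFULL m n := by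
      have h1 := nu_step_lt (m := m) (n := n) hd hinO
      have h2 := nu_le_full (m := m) (n := n) hd hinO
      omega
    -- the head of the run must be collected, so the walk condition holds there
    have hC : pvCondW cb m n F ((o.1 + di, o.2 + dj)) := by
      by_contra hC
      rw [pvW_stop hC] at hr
      simp at hr
    have hstep := pvW_step (cb := cb) (F := F) (p := ((o.1 + di, o.2 + dj) : Int × Int)) hd hν hC
    simp only at hstep
    rw [hstep] at hr
    obtain ⟨hx1, hr'⟩ : x = ((o.1 + di, o.2 + dj) : Int × Int) ∧
        (pvW cb m n di dj F (o.1 + di + di, o.2 + dj + dj)).1 = r' := by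
      exact ⟨(List.cons.injEq _ _ _ _ ▸ hr).1.symm, (List.cons.injEq _ _ _ _ ▸ hr).2⟩
    have hxT : x ∈ T := by
      by_contra hxT
      -- compare with the walk w.r.t. T from the same origin
      have hclosed := hT o ho ((di, dj)) hdm
      simp only at hclosed
      have hνT := hν
      by_cases hCT : pvCondW cb m n T ((o.1 + di, o.2 + dj))
      · -- T's walk collects the head too; analyse where it stops
        have hfac := pvW_factor (cb := cb) (F := F) (G := T) hd hFT
          ((pvW cb m n di dj T (o.1 + di, o.2 + dj)).1) ((o.1 + di, o.2 + dj)) hν rfl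
        have hstepT := pvW_step (cb := cb) (F := T)
          (p := ((o.1 + di, o.2 + dj) : Int × Int)) hd hν hCT
        set u' := (pvW cb m n di dj T (o.1 + di, o.2 + dj)).2 with hu'
        have hnotcond : ¬ pvCondW cb m n T u' :=
          pvW_not_cond (cb := cb) (F := T) (p := ((o.1 + di, o.2 + dj) : Int × Int)) hd hν
        have hpostT : pvPost cb m n T u' := by
          by_cases hCu : pvCondW cb m n F u'
          · -- the F-walk continues at u', so u' is an in-bounds 'O' not in F; not cond for T gives u' ∈ T
            have hmemT : (u'.1, u'.2) ∈ T := by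
              by_contra hmem
              exact hnotcond ⟨hCu.1, hCu.2.1, hCu.2.2.1, hCu.2.2.2.1, hCu.2.2.2.2.1, hmem⟩
            exact ⟨hCu.1, hCu.2.1, hCu.2.2.1, hCu.2.2.2.1, by rw [hCu.2.2.2.2.1]; decide, Or.inr hmemT⟩
          · -- the F-walk stops at u' as well, so u' is the final stop and pvPost F u' holds
            have hnil := pvW_stop (cb := cb) (m := m) (n := n) (di := di) (dj := dj) (F := F) hCu
            rw [hfac, hnil] at hpost
            simp only at hpost
            obtain ⟨c1, c2, c3, c4, c5, c6⟩ := hpost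
            refine ⟨c1, c2, c3, c4, c5, ?_⟩
            rcases c6 with c6 | c6
            · exact Or.inl c6
            · exact Or.inr (hFT _ c6)
        have : pvRunFrom cb m n o.1 o.2 di dj T = (pvW cb m n di dj T (o.1 + di, o.2 + dj)).1 :=
          runFrom_of_post hpostT
        rw [hclosed, hstepT] at this
        simp at this
      · -- T's walk stops at the head: the head is in-bounds 'O', so it must be in T
        have : ((o.1 + di, o.2 + dj) : Int × Int) ∈ T := by
          by_contra hmem
          exact hCT ⟨hC.1, hC.2.1, hC.2.2.1, hC.2.2.2.1, hC.2.2.2.2.1, hmem⟩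
        rw [hx1] at hxT
        exact hxT this
    rcases List.mem_cons.mp hy with rfl | hy'
    · exact hxT
    · -- recurse from x, one step further along the ray
      refine ih ((o.1 + di, o.2 + dj)) ?_ ?_ ?_ y hy'
      · rw [← hx1]; exact hxT
      · simp only; exact hr'
      · simp only
        have h2 := congrArg Prod.snd hstep
        simp only at h2
        rw [← h2]
        exact hpost

lemma absorb {cb : List String} {m n : Int} {di dj : Int} {F T : List (Int × Int)}
    {o : Int × Int} (hdm : ((di, dj) : Int × Int) ∈ pvDirsB)
    (hT : pvClosed cb m n T) (hGT : pvGood cb m n T) (hFT : ∀ x ∈ F, x ∈ T) (ho : o ∈ T) :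
    ∀ x ∈ pvRunFrom cb m n o.1 o.2 di dj F, x ∈ T := by
  have hd := pvDirs_dok _ hdm
  by_cases hp : pvPost cb m n F (pvW cb m n di dj F (o.1 + di, o.2 + dj)).2
  · rw [runFrom_of_post hp]
    exact absorb_aux hd hdm hT hGT hFT _ o ho rfl hp
  · rw [runFrom_of_not_post hp]
    intro x hx
    simp at hx

lemma card_bound {cb : List String} {m n : Int} {F : List (Int × Int)}
    (hm : 0 ≤ m) (hn : 0 ≤ n) (hG : pvGood cb m n F) (hN : F.Nodup) :
    F.length ≤ (m * n).toNat := by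
  classical
  have h1 := List.toFinset_card_of_nodup hN
  have h2 : F.toFinset ⊆ (Finset.Ico (0 : Int) m) ×ˢ (Finset.Ico (0 : Int) n) := by
    intro x hx
    simp only [List.mem_toFinset] at hx
    obtain ⟨⟨c1, c2, c3, c4⟩, -⟩ := hG x hx
    simp [Finset.mem_product, Finset.mem_Ico]
    omega
  have h3 := Finset.card_le_card h2
  rw [Finset.card_product] at h3
  simp only [Int.card_Ico] at h3
  have : (m - 0).toNat * (n - 0).toNat = (m * n).toNat := by
    rw [show m - 0 = m by ring, show n - 0 = n by ring, Int.toNat_mul hm hn]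
  omega

lemma runFrom_mem {cb : List String} {m n i j di dj : Int} {F : List (Int × Int)} :
    ∀ x ∈ pvRunFrom cb m n i j di dj F, pvCondW cb m n F x := by
  by_cases hp : pvPost cb m n F (pvW cb m n di dj F (i + di, j + dj)).2
  · rw [runFrom_of_post hp]
    intro x hx
    exact pvW_run_mem hx
  · rw [runFrom_of_not_post hp]
    intro x hx
    simp at hx

lemma runFrom_nodup {cb : List String} {m n i j di dj : Int} {F : List (Int × Int)}
    (hd : pvDOK di dj) : (pvRunFrom cb m n i j di dj F).Nodup := by
  by_cases hp : pvPost cb m n F (pvW cb m n di dj F (i + di, j + dj)).2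
  · rw [runFrom_of_post hp]
    exact pvW_nodup hd
  · rw [runFrom_of_not_post hp]
    simp

-- the per-direction A-wave step and B-pass/seed steps, as named functions
def pvStepA (cb : List String) (m n : Int) (rc : Int × Int)
    (st : List (Int × Int) × List (Int × Int)) (dir : Int × Int) :
    List (Int × Int) × List (Int × Int) :=
  let nw := pvFindA cb m n dir.1 dir.2 st.2 ((m + n).toNat + 2) rc.1 rc.2 []
  (PySem.Set.union st.1 nw, PySem.Set.union st.2 nw)

def pvStepS (cb : List String) (m n i j : Int) (flipped : List (Int × Int))
    (dir : Int × Int) : List (Int × Int) :=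
  PySem.Set.union flipped (pvRunFrom cb m n i j dir.1 dir.2 flipped)

lemma wave_eq (cb : List String) (m n : Int) (q visited : List (Int × Int)) :
    pvWave cb m n q visited =
      q.foldl (fun st rc => pvDirsA.foldl (pvStepA cb m n rc) st) ([], visited) := by
  unfold pvWave
  congr 1

lemma seedB_eq (cb : List String) (m n i j : Int) :
    pvSeedB cb m n i j = pvDirsB.foldl (pvStepS cb m n i j) [] := rfl

-- nw is fresh: helper to split the Set.union updates
lemma union_fresh {cb : List String} {m n i j di dj : Int} {F L : List (Int × Int)}
    (hd : pvDOK di dj) (hL : ∀ x ∈ L, x ∈ F ∨ pvAt cb x.1 x.2 = '.') :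
    PySem.Set.union L (pvRunFrom cb m n i j di dj F) = L ++ pvRunFrom cb m n i j di dj F := by
  refine set_union_append (runFrom_nodup hd) ?_
  intro x hx hxL
  have hC := runFrom_mem x hx
  rcases hL x hxL with h | h
  · exact hC.2.2.2.2.2 h
  · have h1 := hC.2.2.2.2.1
    rw [h] at h1
    exact absurd h1 (by decide)

lemma seed_aux {cb : List String} {m n : Int} {s : Int × Int}
    (hs : pvAt cb s.1 s.2 = '.') (hin : pvInB m n s) :
    ∀ (ds : List (Int × Int)), (∀ d ∈ ds, d ∈ pvDirsB) →
      ∀ E : List (Int × Int), pvGood cb m n E → E.Nodup →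
        ds.foldl (pvStepA cb m n s) (E, s :: E) =
          (ds.foldl (pvStepS cb m n s.1 s.2) E, s :: ds.foldl (pvStepS cb m n s.1 s.2) E) ∧
        pvGood cb m n (ds.foldl (pvStepS cb m n s.1 s.2) E) ∧
        (ds.foldl (pvStepS cb m n s.1 s.2) E).Nodup ∧
        (∀ x ∈ E, x ∈ ds.foldl (pvStepS cb m n s.1 s.2) E) := by
  intro ds
  induction ds with
  | nil => intro _ E hG hN; exact ⟨rfl, hG, hN, fun x hx => hx⟩
  | cons d ds' ih =>
    intro hds E hG hN
    have hdm : d ∈ pvDirsB := hds d (List.mem_cons_self)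
    have hd := pvDirs_dok d hdm
    have hvis : ∀ p : Int × Int, p ∈ (s :: E) ↔ p ∈ E ∨ p = s := by
      intro p; simp [List.mem_cons, or_comm]
    have hbridge : pvFindA cb m n d.1 d.2 (s :: E) ((m + n).toNat + 2) s.1 s.2 [] =
        pvRunFrom cb m n s.1 s.2 d.1 d.2 E := by
      have := findA_runFrom (cb := cb) (m := m) (n := n) (di := d.1) (dj := d.2)
        (visited := s :: E) (F := E) (s := s) hd hs hvis (by exact hin)
      exact this
    set nw := pvRunFrom cb m n s.1 s.2 d.1 d.2 E with hnw
    have hnwC : ∀ x ∈ nw, pvCondW cb m n E x := fun x hx => runFrom_mem x hx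
    have hu1 : PySem.Set.union E nw = E ++ nw :=
      union_fresh hd (fun x hx => Or.inl hx)
    have hu2 : PySem.Set.union (s :: E) nw = (s :: E) ++ nw := by
      refine union_fresh hd ?_
      intro x hx
      rcases List.mem_cons.mp hx with rfl | hx
      · exact Or.inr hs
      · exact Or.inl hx
    have hstepA : pvStepA cb m n s (E, s :: E) d = (E ++ nw, s :: (E ++ nw)) := by
      unfold pvStepA
      simp only [hbridge, ← hnw, hu1, hu2]
      rfl
    have hstepS : pvStepS cb m n s.1 s.2 E d = E ++ nw := by
      unfold pvStepS
      rw [← hnw, hu1]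
    have hG' : pvGood cb m n (E ++ nw) := by
      intro x hx
      rcases List.mem_append.mp hx with hx | hx
      · exact hG x hx
      · exact ⟨⟨(hnwC x hx).1, (hnwC x hx).2.1, (hnwC x hx).2.2.1, (hnwC x hx).2.2.2.1⟩,
          (hnwC x hx).2.2.2.2.1⟩
    have hN' : (E ++ nw).Nodup := by
      rw [List.nodup_append]
      refine ⟨hN, runFrom_nodup hd, ?_⟩
      intro x hx y hy
      intro heq
      subst heq
      exact (hnwC x hy).2.2.2.2.2 hx
    have := ih (fun d' hd' => hds d' (List.mem_cons_of_mem _ hd')) (E ++ nw) hG' hN'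
    simp only [List.foldl_cons, hstepA, hstepS]
    exact ⟨this.1, this.2.1, this.2.2.1, fun x hx => this.2.2.2 x (List.mem_append_left _ hx)⟩

set_option maxHeartbeats 1000000 in
lemma cell_aux {cb : List String} {m n : Int} {s o : Int × Int} {F0 : List (Int × Int)}
    (hs : pvAt cb s.1 s.2 = '.') (ho : pvInB m n o) :
    ∀ (ds : List (Int × Int)), (∀ d ∈ ds, d ∈ pvDirsB) →
      ∀ E : List (Int × Int), pvGood cb m n (F0 ++ E) → (F0 ++ E).Nodup →
        ∃ Δ : List (Int × Int),
          ds.foldl (pvStepA cb m n o) (E, s :: (F0 ++ E)) =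
            (E ++ Δ, s :: (F0 ++ (E ++ Δ))) ∧
          pvGood cb m n (F0 ++ (E ++ Δ)) ∧ (F0 ++ (E ++ Δ)).Nodup ∧
          (∀ T, pvClosed cb m n T → pvGood cb m n T →
            (∀ x ∈ F0 ++ E, x ∈ T) → o ∈ T → ∀ x ∈ Δ, x ∈ T) ∧
          (∀ d ∈ ds, ∃ G, (∀ x ∈ F0 ++ E, x ∈ G) ∧ (∀ x ∈ G, x ∈ F0 ++ (E ++ Δ)) ∧
            ∀ x ∈ pvRunFrom cb m n o.1 o.2 d.1 d.2 G, x ∈ F0 ++ (E ++ Δ)) := by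
  intro ds
  induction ds with
  | nil =>
    intro _ E hG hN
    refine ⟨[], by simp, by simpa using hG, by simpa using hN, ?_, ?_⟩
    · intro T _ _ _ _ x hx; simp at hx
    · intro d hd; simp at hd
  | cons d ds' ih =>
    intro hds E hG hN
    have hdm : d ∈ pvDirsB := hds d (List.mem_cons_self)
    have hd := pvDirs_dok d hdm
    have hvis : ∀ p : Int × Int, p ∈ (s :: (F0 ++ E)) ↔ p ∈ F0 ++ E ∨ p = s := by
      intro p; simp [List.mem_cons, or_comm]
    have hbridge : pvFindA cb m n d.1 d.2 (s :: (F0 ++ E)) ((m + n).toNat + 2) o.1 o.2 [] =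
        pvRunFrom cb m n o.1 o.2 d.1 d.2 (F0 ++ E) :=
      findA_runFrom hd hs hvis ho
    set nw := pvRunFrom cb m n o.1 o.2 d.1 d.2 (F0 ++ E) with hnw
    have hnwC : ∀ x ∈ nw, pvCondW cb m n (F0 ++ E) x := fun x hx => runFrom_mem x hx
    have hu1 : PySem.Set.union E nw = E ++ nw :=
      union_fresh hd (fun x hx => Or.inl (List.mem_append_right _ hx))
    have hu2 : PySem.Set.union (s :: (F0 ++ E)) nw = (s :: (F0 ++ E)) ++ nw := by
      refine union_fresh hd ?_
      intro x hx
      rcases List.mem_cons.mp hx with rfl | hx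
      · exact Or.inr hs
      · exact Or.inl hx
    have hstepA : pvStepA cb m n o (E, s :: (F0 ++ E)) d =
        (E ++ nw, s :: (F0 ++ (E ++ nw))) := by
      unfold pvStepA
      simp only [hbridge, ← hnw, hu1, hu2]
      simp [List.append_assoc]
    have hG' : pvGood cb m n (F0 ++ (E ++ nw)) := by
      intro x hx
      rcases List.mem_append.mp hx with hx | hx
      · exact hG x (List.mem_append_left _ hx)
      · rcases List.mem_append.mp hx with hx | hx
        · exact hG x (List.mem_append_right _ hx)
        · exact ⟨⟨(hnwC x hx).1, (hnwC x hx).2.1, (hnwC x hx).2.2.1, (hnwC x hx).2.2.2.1⟩,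
            (hnwC x hx).2.2.2.2.1⟩
    have hN' : (F0 ++ (E ++ nw)).Nodup := by
      rw [← List.append_assoc, List.nodup_append]
      refine ⟨hN, runFrom_nodup hd, ?_⟩
      intro x hx y hy
      intro heq
      subst heq
      exact (hnwC x hy).2.2.2.2.2 hx
    obtain ⟨Δ', hshape, hGf, hNf, hjust, hp4⟩ :=
      ih (fun d' hd' => hds d' (List.mem_cons_of_mem _ hd')) (E ++ nw) hG' hN'
    refine ⟨nw ++ Δ', ?_, ?_, ?_, ?_, ?_⟩
    · simp only [List.foldl_cons, hstepA, hshape, List.append_assoc]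
    · simpa [List.append_assoc] using hGf
    · simpa [List.append_assoc] using hNf
    · intro T hTc hTg hTmem hoT x hx
      have hnwT : ∀ y ∈ nw, y ∈ T := by
        intro y hy
        exact absorb hdm hTc hTg hTmem hoT y hy
      rcases List.mem_append.mp hx with hx | hx
      · exact hnwT x hx
      · refine hjust T hTc hTg ?_ hoT x hx
        intro y hy
        rcases List.mem_append.mp hy with hy | hy
        · exact hTmem y (List.mem_append_left _ hy)
        · rcases List.mem_append.mp hy with hy | hy
          · exact hTmem y (List.mem_append_right _ hy)
          · exact hnwT y hy
    · intro d' hd'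
      rcases List.mem_cons.mp hd' with rfl | hd'
      · refine ⟨F0 ++ E, fun x hx => hx, ?_, ?_⟩
        · intro x hx
          simp only [List.mem_append] at hx ⊢
          tauto
        · intro x hx
          rw [← hnw] at hx
          simp only [List.mem_append]
          exact Or.inr (Or.inr (Or.inl hx))
      · obtain ⟨G, hG1, hG2, hG3⟩ := hp4 d' hd'
        refine ⟨G, ?_, ?_, ?_⟩
        · intro x hx
          refine hG1 x ?_
          simp only [List.mem_append] at hx ⊢
          tauto
        · intro x hx
          have h := hG2 x hx
          simp only [List.mem_append] at h ⊢
          tauto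
        · intro x hx
          have h := hG3 x hx
          simp only [List.mem_append] at h ⊢
          tauto

set_option maxHeartbeats 1000000 in
lemma wave_aux {cb : List String} {m n : Int} {s : Int × Int} {F0 : List (Int × Int)}
    (hs : pvAt cb s.1 s.2 = '.') :
    ∀ (q : List (Int × Int)), (∀ u ∈ q, u ∈ F0) →
      ∀ E : List (Int × Int), pvGood cb m n (F0 ++ E) → (F0 ++ E).Nodup →
        ∃ Δ : List (Int × Int),
          q.foldl (fun st rc => pvDirsA.foldl (pvStepA cb m n rc) st) (E, s :: (F0 ++ E)) =
            (E ++ Δ, s :: (F0 ++ (E ++ Δ))) ∧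
          pvGood cb m n (F0 ++ (E ++ Δ)) ∧ (F0 ++ (E ++ Δ)).Nodup ∧
          (∀ T, pvClosed cb m n T → pvGood cb m n T →
            (∀ x ∈ F0 ++ E, x ∈ T) → ∀ x ∈ Δ, x ∈ T) ∧
          (∀ u ∈ q, ∀ d ∈ pvDirsB, ∃ G, (∀ x ∈ F0 ++ E, x ∈ G) ∧
            (∀ x ∈ G, x ∈ F0 ++ (E ++ Δ)) ∧
            ∀ x ∈ pvRunFrom cb m n u.1 u.2 d.1 d.2 G, x ∈ F0 ++ (E ++ Δ)) := by
  intro q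
  induction q with
  | nil =>
    intro _ E hG hN
    refine ⟨[], by simp, by simpa using hG, by simpa using hN, ?_, ?_⟩
    · intro T _ _ _ x hx; simp at hx
    · intro u hu; simp at hu
  | cons u q' ih =>
    intro hq E hG hN
    have huF0 : u ∈ F0 := hq u (List.mem_cons_self)
    have hoin : pvInB m n u := (hG u (List.mem_append_left _ huF0)).1
    have hdsA : ∀ d ∈ pvDirsA, d ∈ pvDirsB := by rw [pvDirsA_eq]; exact fun d hd => hd
    obtain ⟨Δ1, hshape1, hG1, hN1, hjust1, hp41⟩ :=
      cell_aux (s := s) (F0 := F0) hs hoin pvDirsA hdsA E hG hN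
    obtain ⟨Δ2, hshape2, hG2, hN2, hjust2, hp42⟩ :=
      ih (fun v hv => hq v (List.mem_cons_of_mem _ hv)) (E ++ Δ1) hG1 hN1
    refine ⟨Δ1 ++ Δ2, ?_, ?_, ?_, ?_, ?_⟩
    · simp only [List.foldl_cons, hshape1, hshape2, List.append_assoc]
    · simpa [List.append_assoc] using hG2
    · simpa [List.append_assoc] using hN2
    · intro T hTc hTg hTmem x hx
      have hΔ1T : ∀ y ∈ Δ1, y ∈ T := by
        intro y hy
        exact hjust1 T hTc hTg hTmem (hTmem u (List.mem_append_left _ huF0)) y hy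
      rcases List.mem_append.mp hx with hx | hx
      · exact hΔ1T x hx
      · refine hjust2 T hTc hTg ?_ x hx
        intro y hy
        simp only [List.mem_append] at hy
        rcases hy with hy | hy | hy
        · exact hTmem y (List.mem_append_left _ hy)
        · exact hTmem y (List.mem_append_right _ hy)
        · exact hΔ1T y hy
    · intro v hv d hd
      rcases List.mem_cons.mp hv with rfl | hv
      · obtain ⟨G, hGa, hGb, hGc⟩ := hp41 d (by rw [pvDirsA_eq]; exact hd)
        refine ⟨G, hGa, ?_, ?_⟩
        · intro x hx
          have h := hGb x hx
          simp only [List.mem_append] at h ⊢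
          tauto
        · intro x hx
          have h := hGc x hx
          simp only [List.mem_append] at h ⊢
          tauto
      · obtain ⟨G, hGa, hGb, hGc⟩ := hp42 v hv d hd
        refine ⟨G, ?_, ?_, ?_⟩
        · intro x hx
          refine hGa x ?_
          simp only [List.mem_append] at hx ⊢
          tauto
        · intro x hx
          have h := hGb x hx
          simp only [List.mem_append] at h ⊢
          tauto
        · intro x hx
          have h := hGc x hx
          simp only [List.mem_append] at h ⊢
          tauto

set_option maxHeartbeats 1000000 in
lemma invb_preserved {cb : List String} {m n : Int} {s : Int × Int}
    {F0 Δ q : List (Int × Int)} (hs : pvAt cb s.1 s.2 = '.')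
    (hGf : pvGood cb m n (F0 ++ Δ)) (hq : ∀ u ∈ q, u ∈ F0)
    (hb : pvINVb cb m n q F0)
    (hp4 : ∀ u ∈ q, ∀ d ∈ pvDirsB, ∃ G, (∀ x ∈ F0, x ∈ G) ∧ (∀ x ∈ G, x ∈ F0 ++ Δ) ∧
      ∀ x ∈ pvRunFrom cb m n u.1 u.2 d.1 d.2 G, x ∈ F0 ++ Δ) :
    pvINVb cb m n Δ (F0 ++ Δ) := by
  intro v hv hvΔ dir hdir
  have hd := pvDirs_dok dir hdir
  have hvF0 : v ∈ F0 := by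
    rcases List.mem_append.mp hv with h | h
    · exact h
    · exact absurd h hvΔ
  have hvin : pvInB m n v := (hGf v hv).1
  have hvO : pvAt cb v.1 v.2 = 'O' := (hGf v hv).2
  have hν : pvNu m n dir.1 dir.2 (v.1 + dir.1) (v.2 + dir.2) ≤ pvFULL m n := by
    have h1 := nu_step_lt (m := m) (n := n) hd (p := v) hvin
    have h2 := nu_le_full (m := m) (n := n) hd (p := v) hvin
    omega
  by_cases hpost : pvPost cb m n (F0 ++ Δ)
      (pvW cb m n dir.1 dir.2 (F0 ++ Δ) (v.1 + dir.1, v.2 + dir.2)).2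
  case neg => exact Or.inl (runFrom_of_not_post hpost)
  set r := (pvW cb m n dir.1 dir.2 (F0 ++ Δ) (v.1 + dir.1, v.2 + dir.2)).1 with hr
  rcases List.eq_nil_or_concat' r with hrnil | ⟨r0, x0, hrne⟩
  · exact Or.inl (by rw [runFrom_of_post hpost, ← hr, hrnil])
  have hrne' : r ≠ [] := by rw [hrne]; simp
  set u := (pvW cb m n dir.1 dir.2 (F0 ++ Δ) (v.1 + dir.1, v.2 + dir.2)).2 with hu
  have hrmem : ∀ x ∈ r, pvCondW cb m n (F0 ++ Δ) x := fun x hx => pvW_run_mem hx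
  have hnotcondu : ¬ pvCondW cb m n (F0 ++ Δ) u := pvW_not_cond hd hν
  right
  by_contra huΔ
  -- u is in bounds, not '.', and white for F0 ++ Δ
  have hpostu := hpost
  by_cases hvq : v ∈ q
  · -- v was expanded during this wave: use its recorded blocker set G
    obtain ⟨G, hGa, hGb, hGc⟩ := hp4 v hvq dir hdir
    have hfac := pvW_factor (cb := cb) (F := G) (G := F0 ++ Δ) hd hGb r
      ((v.1 + dir.1, v.2 + dir.2)) hν hr.symm
    by_cases hCu : pvCondW cb m n G u
    · -- the G-walk would continue at u: then u is an 'O' cell of F0 ++ Δ outside G ⊇ F0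
      rcases hpostu.2.2.2.2.2 with hO | hmem
      · exact hO hCu.2.2.2.2.1
      · rcases List.mem_append.mp (show u ∈ F0 ++ Δ from by
            have : ((u.1, u.2) : Int × Int) = u := rfl
            rw [← this]; exact hmem) with h | h
        · exact hCu.2.2.2.2.2 (by
            have : ((u.1, u.2) : Int × Int) = u := rfl
            rw [this]; exact hGa u h)
        · exact huΔ h
    · -- the G-walk stops at u too, with a valid terminator: its run r must be inside F0 ++ Δ
      have hnil := pvW_stop (cb := cb) (m := m) (n := n) (di := dir.1) (dj := dir.2) (F := G) hCu
      have hWG : pvW cb m n dir.1 dir.2 G (v.1 + dir.1, v.2 + dir.2) = (r, u) := by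
        rw [hfac, ← hu, hnil]
        simp
      have hpostG : pvPost cb m n G (pvW cb m n dir.1 dir.2 G (v.1 + dir.1, v.2 + dir.2)).2 := by
        rw [hWG]
        refine ⟨hpostu.1, hpostu.2.1, hpostu.2.2.1, hpostu.2.2.2.1, hpostu.2.2.2.2.1, ?_⟩
        rcases hpostu.2.2.2.2.2 with hO | hmem
        · exact Or.inl hO
        · right
          rcases List.mem_append.mp (show ((u.1, u.2) : Int × Int) ∈ F0 ++ Δ from hmem)
            with h | h
          · exact hGa _ h
          · exact absurd h (by
              intro hcon
              exact huΔ (show u ∈ Δ from by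
                have : ((u.1, u.2) : Int × Int) = u := rfl
                rw [← this]; exact hcon))
      have hrun := runFrom_of_post hpostG
      rw [hWG] at hrun
      have hx0 := hGc x0 (by rw [hrun, hrne]; simp)
      exact (hrmem x0 (by rw [hrne]; simp)).2.2.2.2.2 hx0
  · -- v is a settled cell: its old run must have terminated in the old frontier q
    have hfac := pvW_factor (cb := cb) (F := F0) (G := F0 ++ Δ) hd
      (fun x hx => List.mem_append_left _ hx) r ((v.1 + dir.1, v.2 + dir.2)) hν hr.symm
    by_cases hCu0 : pvCondW cb m n F0 u
    · -- u is an 'O' cell outside F0; by pvPost it lies in F0 ++ Δ, hence in Δ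
      rcases hpostu.2.2.2.2.2 with hO | hmem
      · exact hO hCu0.2.2.2.2.1
      · rcases List.mem_append.mp (show ((u.1, u.2) : Int × Int) ∈ F0 ++ Δ from hmem)
          with h | h
        · exact hCu0.2.2.2.2.2 h
        · exact huΔ (show u ∈ Δ from by
            have : ((u.1, u.2) : Int × Int) = u := rfl
            rw [← this]; exact h)
    · -- the F0-walk also stops at u, with a valid terminator
      have hnil := pvW_stop (cb := cb) (m := m) (n := n) (di := dir.1) (dj := dir.2) (F := F0) hCu0
      have hWF0 : pvW cb m n dir.1 dir.2 F0 (v.1 + dir.1, v.2 + dir.2) = (r, u) := by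
        rw [hfac, ← hu, hnil]
        simp
      have hpost0 : pvPost cb m n F0 (pvW cb m n dir.1 dir.2 F0 (v.1 + dir.1, v.2 + dir.2)).2 := by
        rw [hWF0]
        refine ⟨hpostu.1, hpostu.2.1, hpostu.2.2.1, hpostu.2.2.2.1, hpostu.2.2.2.2.1, ?_⟩
        rcases hpostu.2.2.2.2.2 with hO | hmem
        · exact Or.inl hO
        · right
          rcases List.mem_append.mp (show ((u.1, u.2) : Int × Int) ∈ F0 ++ Δ from hmem)
            with h | h
          · exact h
          · exact absurd h (by
              intro hcon
              exact huΔ (show u ∈ Δ from by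
                have : ((u.1, u.2) : Int × Int) = u := rfl
                rw [← this]; exact hcon))
      have hrun0 := runFrom_of_post hpost0
      rw [hWF0] at hrun0
      have hold := hb v hvF0 hvq dir hdir
      rcases hold with hold | hold
      · rw [hrun0] at hold
        exact hrne' hold
      · -- the old stop is u, and u sits in the old frontier q
        have huq : u ∈ q := by
          have : (pvW cb m n dir.1 dir.2 F0 (v.1 + dir.1, v.2 + dir.2)).2 = u := by rw [hWF0]
          rw [← this]
          exact hold
        -- walk back from u with its recorded blocker set G
        have hdir' : ((-dir.1, -dir.2) : Int × Int) ∈ pvDirsB := pvDirs_neg dir hdir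
        obtain ⟨G, hGa, hGb, hGc⟩ := hp4 u huq ((-dir.1, -dir.2)) hdir'
        have hrG : ∀ x ∈ r, x ∉ G := by
          intro x hx hxG
          exact (hrmem x hx).2.2.2.2.2 (hGb x hxG)
        have hrev := pvW_reverse (cb := cb) (F := F0 ++ Δ) (G := G) hd r
          ((v.1 + dir.1, v.2 + dir.2)) hν hr.symm hrG
        rw [← hu] at hrev
        have e1 : v.1 + dir.1 - dir.1 = v.1 := by ring
        have e2 : v.2 + dir.2 - dir.2 = v.2 := by ring
        simp only at hrev
        rw [e1, e2] at hrev
        have hvmemG : ((v.1, v.2) : Int × Int) ∈ G := hGa _ (by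
          have : ((v.1, v.2) : Int × Int) = v := rfl
          rw [this]; exact hvF0)
        have hstopv : pvW cb m n (-dir.1) (-dir.2) G ((v.1 : Int), (v.2 : Int)) =
            ([], v.1, v.2) := by
          refine pvW_stop ?_
          intro hC
          exact hC.2.2.2.2.2 hvmemG
        rw [hstopv] at hrev
        -- now the back run from u is r.reverse, terminated at v ∈ G
        have hpostrev : pvPost cb m n G
            (pvW cb m n (-dir.1) (-dir.2) G (u.1 + -dir.1, u.2 + -dir.2)).2 := by
          rw [show u.1 + -dir.1 = u.1 - dir.1 from by ring,
              show u.2 + -dir.2 = u.2 - dir.2 from by ring, hrev]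
          refine ⟨hvin.1, hvin.2.1, hvin.2.2.1, hvin.2.2.2, ?_, Or.inr hvmemG⟩
          rw [hvO]
          decide
        have hrunrev := runFrom_of_post hpostrev
        rw [show u.1 + -dir.1 = u.1 - dir.1 from by ring,
            show u.2 + -dir.2 = u.2 - dir.2 from by ring, hrev] at hrunrev
        have hx0 := hGc x0 (by rw [hrunrev, hrne]; simp)
        exact (hrmem x0 (by rw [hrne]; simp)).2.2.2.2.2 hx0

lemma loop_nil (cb : List String) (m n : Int) (V : List (Int × Int)) :
    ∀ fuel, pvBfsLoop cb m n fuel [] V = V := by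
  intro fuel
  cases fuel <;> simp [pvBfsLoop]

set_option maxHeartbeats 1000000 in
lemma bfs_main {cb : List String} {m n : Int} {s : Int × Int}
    (hm : 0 ≤ m) (hn : 0 ≤ n) (hs : pvAt cb s.1 s.2 = '.') :
    ∀ (fuel : Nat) (q F : List (Int × Int)),
      pvGood cb m n F → F.Nodup → (∀ u ∈ q, u ∈ F) → pvINVb cb m n q F →
      (m * n).toNat + 2 ≤ fuel + F.length →
      ∃ Ff, pvBfsLoop cb m n fuel q (s :: F) = s :: Ff ∧
        pvGood cb m n Ff ∧ Ff.Nodup ∧ (∀ x ∈ F, x ∈ Ff) ∧ pvClosed cb m n Ff ∧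
        (∀ T, pvClosed cb m n T → pvGood cb m n T → (∀ x ∈ F, x ∈ T) → ∀ x ∈ Ff, x ∈ T) := by
  intro fuel
  induction fuel with
  | zero =>
    intro q F hG hN hq hb hfuel
    exfalso
    have := card_bound hm hn hG hN
    omega
  | succ f ih =>
    intro q F hG hN hq hb hfuel
    by_cases hqe : q = []
    · subst hqe
      refine ⟨F, ?_, hG, hN, fun x hx => hx, ?_, fun T _ _ hT x hx => hT x hx⟩
      · rw [pvBfsLoop, if_pos rfl]
      · intro v hvF dir hdir
        rcases hb v hvF (by simp) dir hdir with h | h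
        · exact h
        · simp at h
    · rw [pvBfsLoop, if_neg hqe, wave_eq]
      obtain ⟨Δ, hshape, hGf, hNf, hjust, hp4⟩ :=
        wave_aux (F0 := F) hs q hq [] (by simpa using hG) (by simpa using hN)
      simp only [List.nil_append, List.append_nil] at hshape hGf hNf hjust hp4
      rw [hshape]
      dsimp only
      have hINV : pvINVb cb m n Δ (F ++ Δ) := by
        refine invb_preserved hs hGf hq hb ?_
        intro u hu d hd
        obtain ⟨G, hGa, hGb, hGc⟩ := hp4 u hu d hd
        exact ⟨G, hGa, hGb, hGc⟩
      by_cases hΔ : Δ = []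
      · subst hΔ
        simp only [List.append_nil] at hGf hNf hINV ⊢
        rw [loop_nil]
        refine ⟨F, rfl, hGf, hNf, fun x hx => hx, ?_, fun T _ _ hT x hx => hT x hx⟩
        intro v hvF dir hdir
        rcases hINV v (by simpa using hvF) (by simp) dir hdir with h | h
        · simpa using h
        · simp at h
      · have hlen : 0 < Δ.length := List.length_pos_iff.mpr hΔ
        have hfuel' : (m * n).toNat + 2 ≤ f + (F ++ Δ).length := by
          rw [List.length_append]
          omega
        obtain ⟨Ff, hloop, hGF, hNF, hsub, hclosed, hmin⟩ :=
          ih Δ (F ++ Δ) hGf hNf (fun u hu => List.mem_append_right _ hu) hINV hfuel'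
        refine ⟨Ff, hloop, hGF, hNF, ?_, hclosed, ?_⟩
        · intro x hx
          exact hsub x (List.mem_append_left _ hx)
        · intro T hTc hTg hT x hx
          refine hmin T hTc hTg ?_ x hx
          intro y hy
          rcases List.mem_append.mp hy with hy | hy
          · exact hT y hy
          · exact hjust T hTc hTg hT y hy

-- ======== B side ========

def pvStepB (cb : List String) (m n : Int) (c : Int × Int)
    (st : List (Int × Int) × Bool) (dir : Int × Int) : List (Int × Int) × Bool :=
  let run := pvRunFrom cb m n c.1 c.2 dir.1 dir.2 st.1
  if run ≠ [] then (PySem.Set.union st.1 run, true) else st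

lemma pass_eq (cb : List String) (m n : Int) (cells flipped : List (Int × Int)) :
    pvPassB cb m n cells flipped =
      cells.foldl (fun st c => pvDirsB.foldl (pvStepB cb m n c) st) (flipped, false) := rfl

set_option maxHeartbeats 1000000 in
lemma passdir_aux {cb : List String} {m n : Int} {c : Int × Int} :
    ∀ (ds : List (Int × Int)), (∀ d ∈ ds, d ∈ pvDirsB) →
      ∀ (Fc : List (Int × Int)) (b : Bool), pvGood cb m n Fc → Fc.Nodup →
        ∃ Δ : List (Int × Int),
          ds.foldl (pvStepB cb m n c) (Fc, b) = (Fc ++ Δ, b || !Δ.isEmpty) ∧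
          pvGood cb m n (Fc ++ Δ) ∧ (Fc ++ Δ).Nodup ∧
          (∀ T, pvClosed cb m n T → pvGood cb m n T →
            (∀ x ∈ Fc, x ∈ T) → c ∈ T → ∀ x ∈ Δ, x ∈ T) ∧
          (Δ = [] → ∀ d ∈ ds, pvRunFrom cb m n c.1 c.2 d.1 d.2 Fc = []) := by
  intro ds
  induction ds with
  | nil =>
    intro _ Fc b hG hN
    refine ⟨[], by simp, by simpa using hG, by simpa using hN, ?_, ?_⟩
    · intro T _ _ _ _ x hx; simp at hx
    · intro _ d hd; simp at hd
  | cons d ds' ih =>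
    intro hds Fc b hG hN
    have hdm : d ∈ pvDirsB := hds d (List.mem_cons_self)
    have hd := pvDirs_dok d hdm
    set run := pvRunFrom cb m n c.1 c.2 d.1 d.2 Fc with hrun
    have hrC : ∀ x ∈ run, pvCondW cb m n Fc x := fun x hx => runFrom_mem x hx
    by_cases hre : run = []
    · have hstep : pvStepB cb m n c (Fc, b) d = (Fc, b) := by
        unfold pvStepB
        rw [← hrun, if_neg (by simpa using hre)]
      obtain ⟨Δ, hshape, hGf, hNf, hjust, hharv⟩ :=
        ih (fun d' hd' => hds d' (List.mem_cons_of_mem _ hd')) Fc b hG hN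
      refine ⟨Δ, ?_, hGf, hNf, hjust, ?_⟩
      · simp only [List.foldl_cons, hstep, hshape]
      · intro hΔ d' hd'
        rcases List.mem_cons.mp hd' with rfl | hd'
        · exact hre
        · exact hharv hΔ d' hd'
    · have hu : PySem.Set.union Fc run = Fc ++ run := by
        rw [hrun]
        exact union_fresh hd (fun x hx => Or.inl hx)
      have hstep : pvStepB cb m n c (Fc, b) d = (Fc ++ run, true) := by
        unfold pvStepB
        rw [← hrun, if_pos (by simpa using hre), hu]
      have hG' : pvGood cb m n (Fc ++ run) := by
        intro x hx
        rcases List.mem_append.mp hx with hx | hx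
        · exact hG x hx
        · exact ⟨⟨(hrC x hx).1, (hrC x hx).2.1, (hrC x hx).2.2.1, (hrC x hx).2.2.2.1⟩,
            (hrC x hx).2.2.2.2.1⟩
      have hN' : (Fc ++ run).Nodup := by
        rw [List.nodup_append]
        refine ⟨hN, by rw [hrun]; exact runFrom_nodup hd, ?_⟩
        intro x hx y hy heq
        subst heq
        exact (hrC x hy).2.2.2.2.2 hx
      obtain ⟨Δ', hshape, hGf, hNf, hjust, -⟩ :=
        ih (fun d' hd' => hds d' (List.mem_cons_of_mem _ hd')) (Fc ++ run) true hG' hN'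
      refine ⟨run ++ Δ', ?_, ?_, ?_, ?_, ?_⟩
      · simp only [List.foldl_cons, hstep, hshape, List.append_assoc]
        have : (true || !Δ'.isEmpty) = (b || !(run ++ Δ').isEmpty) := by
          rcases run with - | ⟨a, t⟩
          · exact absurd rfl hre
          · simp
        rw [this]
      · simpa [List.append_assoc] using hGf
      · simpa [List.append_assoc] using hNf
      · intro T hTc hTg hTm hcT x hx
        have hrT : ∀ y ∈ run, y ∈ T := by
          intro y hy
          rw [hrun] at hy
          exact absorb hdm hTc hTg hTm hcT y hy
        rcases List.mem_append.mp hx with hx | hx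
        · exact hrT x hx
        · refine hjust T hTc hTg ?_ hcT x hx
          intro y hy
          rcases List.mem_append.mp hy with hy | hy
          · exact hTm y hy
          · exact hrT y hy
      · intro hΔ
        exact absurd (List.append_eq_nil_iff.mp hΔ).1 hre

set_option maxHeartbeats 1000000 in
lemma pass_aux {cb : List String} {m n : Int} :
    ∀ (cells : List (Int × Int)) (Fc : List (Int × Int)) (b : Bool),
      pvGood cb m n Fc → Fc.Nodup →
      ∃ Δ : List (Int × Int),
        cells.foldl (fun st c => pvDirsB.foldl (pvStepB cb m n c) st) (Fc, b) =
          (Fc ++ Δ, b || !Δ.isEmpty) ∧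
        pvGood cb m n (Fc ++ Δ) ∧ (Fc ++ Δ).Nodup ∧
        (∀ T, pvClosed cb m n T → pvGood cb m n T →
          (∀ x ∈ Fc, x ∈ T) → (∀ c ∈ cells, c ∈ T) → ∀ x ∈ Δ, x ∈ T) ∧
        (Δ = [] → ∀ c ∈ cells, ∀ d ∈ pvDirsB, pvRunFrom cb m n c.1 c.2 d.1 d.2 Fc = []) := by
  intro cells
  induction cells with
  | nil =>
    intro Fc b hG hN
    refine ⟨[], by simp, by simpa using hG, by simpa using hN, ?_, ?_⟩
    · intro T _ _ _ _ x hx; simp at hx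
    · intro _ c hc; simp at hc
  | cons c cells' ih =>
    intro Fc b hG hN
    obtain ⟨Δ1, hshape1, hG1, hN1, hjust1, hharv1⟩ :=
      passdir_aux (c := c) pvDirsB (fun d hd => hd) Fc b hG hN
    obtain ⟨Δ2, hshape2, hG2, hN2, hjust2, hharv2⟩ := ih (Fc ++ Δ1) (b || !Δ1.isEmpty) hG1 hN1
    refine ⟨Δ1 ++ Δ2, ?_, ?_, ?_, ?_, ?_⟩
    · simp only [List.foldl_cons, hshape1, hshape2, List.append_assoc]
      congr 1
      rcases Δ1 with - | _ <;> rcases Δ2 with - | _ <;> simp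
    · simpa [List.append_assoc] using hG2
    · simpa [List.append_assoc] using hN2
    · intro T hTc hTg hTm hcells x hx
      have hΔ1T : ∀ y ∈ Δ1, y ∈ T :=
        hjust1 T hTc hTg hTm (hcells c (List.mem_cons_self))
      rcases List.mem_append.mp hx with hx | hx
      · exact hΔ1T x hx
      · refine hjust2 T hTc hTg ?_ (fun c' hc' => hcells c' (List.mem_cons_of_mem _ hc')) x hx
        intro y hy
        rcases List.mem_append.mp hy with hy | hy
        · exact hTm y hy
        · exact hΔ1T y hy
    · intro hΔ c' hc' d hd
      have h1 : Δ1 = [] := by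
        rcases List.append_eq_nil_iff.mp hΔ with ⟨h, -⟩
        exact h
      have h2 : Δ2 = [] := by
        rcases List.append_eq_nil_iff.mp hΔ with ⟨-, h⟩
        exact h
      rcases List.mem_cons.mp hc' with rfl | hc'
      · exact hharv1 h1 d hd
      · have := hharv2 h2 c' hc' d hd
        rw [h1, List.append_nil] at this
        exact this

set_option maxHeartbeats 1000000 in
lemma sat_main {cb : List String} {m n : Int} (hm : 0 ≤ m) (hn : 0 ≤ n) :
    ∀ (fuel : Nat) (F : List (Int × Int)), pvGood cb m n F → F.Nodup →
      (m * n).toNat + 2 ≤ fuel + F.length →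
      ∃ U, pvSatLoop cb m n fuel F = U ∧ pvGood cb m n U ∧ U.Nodup ∧
        (∀ x ∈ F, x ∈ U) ∧ pvClosed cb m n U ∧
        (∀ T, pvClosed cb m n T → pvGood cb m n T → (∀ x ∈ F, x ∈ T) → ∀ x ∈ U, x ∈ T) := by
  intro fuel
  induction fuel with
  | zero =>
    intro F hG hN hfuel
    exfalso
    have := card_bound hm hn hG hN
    omega
  | succ f ih =>
    intro F hG hN hfuel
    rw [pvSatLoop]
    rw [pass_eq]
    obtain ⟨Δ, hshape, hGf, hNf, hjust, hharv⟩ := pass_aux F F false hG hN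
    rw [hshape]
    by_cases hΔ : Δ = []
    · subst hΔ
      have hharv' := hharv rfl
      simp only [List.append_nil, List.isEmpty_nil, Bool.not_true, Bool.or_false] at hshape ⊢
      refine ⟨F, rfl, hG, hN, fun x hx => hx, ?_, fun T _ _ hT x hx => hT x hx⟩
      intro v hvF dir hdir
      exact hharv' v hvF dir hdir
    · have htrue : (false || !Δ.isEmpty) = true := by
        rcases Δ with - | _
        · exact absurd rfl hΔ
        · simp
      rw [htrue]
      simp only [if_pos]
      have hlen : 0 < Δ.length := List.length_pos_iff.mpr hΔ
      have hfuel' : (m * n).toNat + 2 ≤ f + (F ++ Δ).length := by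
        rw [List.length_append]
        omega
      obtain ⟨U, hloop, hGU, hNU, hsub, hclosed, hmin⟩ := ih (F ++ Δ) hGf hNf hfuel'
      refine ⟨U, hloop, hGU, hNU, ?_, hclosed, ?_⟩
      · intro x hx
        exact hsub x (List.mem_append_left _ hx)
      · intro T hTc hTg hT x hx
        refine hmin T hTc hTg ?_ x hx
        intro y hy
        rcases List.mem_append.mp hy with hy | hy
        · exact hT y hy
        · exact hjust T hTc hTg hT (fun c hc => hT c hc) y hy

lemma wave0_eq {cb : List String} {m n : Int} {s : Int × Int}
    (hs : pvAt cb s.1 s.2 = '.') (hin : pvInB m n s) :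
    pvWave cb m n [s] [s] = (pvSeedB cb m n s.1 s.2, s :: pvSeedB cb m n s.1 s.2) ∧
    pvGood cb m n (pvSeedB cb m n s.1 s.2) ∧ (pvSeedB cb m n s.1 s.2).Nodup := by
  have hdsA : ∀ d ∈ pvDirsA, d ∈ pvDirsB := by rw [pvDirsA_eq]; exact fun d hd => hd
  obtain ⟨h1, h2, h3, -⟩ := seed_aux (m := m) (n := n) hs hin pvDirsA hdsA []
    (by intro x hx; simp at hx) (by simp)
  rw [wave_eq]
  simp only [List.foldl_cons, List.foldl_nil]
  have hseed : pvSeedB cb m n s.1 s.2 = pvDirsA.foldl (pvStepS cb m n s.1 s.2) [] := by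
    rw [seedB_eq, pvDirsA_eq]
  rw [hseed]
  exact ⟨h1, h2, h3⟩

set_option maxHeartbeats 1000000 in
lemma perstart {cb : List String} {m n i j : Int} (hm : 0 ≤ m) (hn : 0 ≤ n)
    (hdot : pvAt cb i j = '.') (hin : pvInB m n ((i, j) : Int × Int)) :
    pvBfsA cb m n i j =
      PySem.List.len (pvSatLoop cb m n ((m * n).toNat + 2) (pvSeedB cb m n i j)) := by
  have hs : pvAt cb ((i, j) : Int × Int).1 ((i, j) : Int × Int).2 = '.' := hdot
  obtain ⟨hw, hGS, hNS⟩ := wave0_eq (m := m) (n := n) (s := ((i, j) : Int × Int)) hs hin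
  unfold pvBfsA
  rw [show (m * n).toNat + 2 = ((m * n).toNat + 1) + 1 from rfl]
  rw [pvBfsLoop, if_neg (by simp)]
  rw [hw]
  dsimp only
  set S0 := pvSeedB cb m n i j with hS0
  by_cases hS0e : S0 = []
  · rw [hS0e, loop_nil, pvSatLoop, pass_eq]
    simp [PySem.List.len_eq]
  · have hb0 : pvINVb cb m n S0 S0 := by
      intro v hv hnv dir hdir
      exact absurd hv hnv
    have hlen : 0 < S0.length := List.length_pos_iff.mpr hS0e
    obtain ⟨Ff, hloop, hGF, hNF, hsubF, hclosedF, hminF⟩ :=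
      bfs_main (s := ((i, j) : Int × Int)) hm hn hs ((m * n).toNat + 1) S0 S0 hGS hNS
        (fun u hu => hu) hb0 (by omega)
    obtain ⟨U, hloopU, hGU, hNU, hsubU, hclosedU, hminU⟩ :=
      sat_main hm hn ((m * n).toNat + 2) S0 hGS hNS (by omega)
    rw [hloop, hloopU]
    have hFfU : ∀ x, x ∈ Ff ↔ x ∈ U := by
      intro x
      constructor
      · intro hx
        exact hminF U hclosedU hGU hsubU x hx
      · intro hx
        exact hminU Ff hclosedF hGF hsubF x hx
    have hlen2 : Ff.length = U.length :=
      ((List.perm_ext_iff_of_nodup hNF hNU).mpr hFfU).length_eq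
    simp only [PySem.List.len_eq, List.length_cons]
    push_cast
    omega

lemma main_eq (cb : List String) : flipChess cb = flipChess_alt cb := by
  unfold flipChess flipChess_alt
  dsimp only
  refine PySem.List.foldl_congr_mem _ _ _ _ ?_
  intro ans i hi
  refine PySem.List.foldl_congr_mem _ _ _ _ ?_
  intro ans' j hj
  have hm : (0 : Int) ≤ PySem.List.len cb := by
    rw [PySem.List.len_eq]
    positivity
  have hn : (0 : Int) ≤ PySem.List.len (PySem.List.pyGetD cb 0 "").toList := by
    rw [PySem.List.len_eq]
    positivity
  rw [PySem.List.mem_pyRange_one] at hi hj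
  by_cases hdot : pvAt cb i j = '.'
  · rw [if_pos hdot, if_neg (by simp [hdot])]
    rw [perstart hm hn hdot ⟨hi.1, hi.2, hj.1, hj.2⟩]
  · rw [if_neg hdot, if_pos (by simp [hdot])]

-- ===== VERDICT (by name: the statement is the Claim_ definition above) =====
theorem flipChess_spec : Claim_equal_flipChess := by
  intro chessboard _ _
  exact main_eq chessboard
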